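-- pv_equiv track=rewrite | github.com/ExChronos/full-stack_node.js | main.py | sumAndValue
-- ===== SOURCE A (Python) =====
-- def sumAndValue(lis):
--     summ = 0
--     count = 0
--     for i in lis:
--         if i % 5 == 0 and i % 7 != 0:
--             summ += i
--             count += 1
--     return (summ, count)
-- ===== SOURCE B (Python) =====
-- def sumAndValue(lis):
--     # Inclusion-exclusion: the wanted elements are the multiples of 5 that are
--     # not multiples of 35 (= 5*7), so aggregate multiples of 5 and subtract
--     # the aggregates of multiples of 35.
--     fives = [i for i in lis if i % 5 == 0]
--     thirty_fives = [i for i in fives if i % 35 == 0]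
--     return (sum(fives) - sum(thirty_fives), len(fives) - len(thirty_fives))
-- ===== Notes on version B (the rewrite author's own statement) =====
-- stated objective: alternative
-- what changed: Replaces the conjunction test i%5==0 and i%7!=0 with inclusion-exclusion: aggregate all multiples of 5 and subtract the aggregates of multiples of 35 (=5*7), so the i%7 test disappears and the result is a difference of two simpler aggregates.
import Mathlib
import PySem

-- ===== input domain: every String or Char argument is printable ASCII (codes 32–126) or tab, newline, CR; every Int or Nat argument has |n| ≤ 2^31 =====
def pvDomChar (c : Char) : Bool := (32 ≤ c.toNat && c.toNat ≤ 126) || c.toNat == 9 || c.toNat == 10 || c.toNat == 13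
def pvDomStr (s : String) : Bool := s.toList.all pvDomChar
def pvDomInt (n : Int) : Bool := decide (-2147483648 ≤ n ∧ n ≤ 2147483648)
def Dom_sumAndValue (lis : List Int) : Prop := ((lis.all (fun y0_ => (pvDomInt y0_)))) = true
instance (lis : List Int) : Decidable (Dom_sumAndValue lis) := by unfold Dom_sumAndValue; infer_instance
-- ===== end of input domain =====

-- B replaces A's conjunction test (i%5==0 and i%7!=0) by inclusion-exclusion over multiples
-- of 5 and of 35, returning differences of the two aggregates (alternative algorithm, same cost).

-- ===== PORT A =====
-- literal port: fold over the list carrying the pair (summ, count)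
def sumAndValue (lis : List Int) : Int × Int :=
  let st := lis.foldl (fun (st : Int × Int) i =>
    if PySem.Int.mod i 5 = 0 ∧ PySem.Int.mod i 7 ≠ 0 then (st.1 + i, st.2 + 1) else st)
    (0, 0)
  (st.1, st.2)

-- ===== PORT B =====
def sumAndValue_alt (lis : List Int) : Int × Int :=
  let fives := lis.filter (fun i => decide (PySem.Int.mod i 5 = 0))
  let thirtyFives := fives.filter (fun i => decide (PySem.Int.mod i 35 = 0))
  (fives.sum - thirtyFives.sum, (fives.length : Int) - (thirtyFives.length : Int))

-- ===== PRECONDITION & SPEC =====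
def Spec_sumAndValue (lis : List Int) (out : Int × Int) : Prop := out = sumAndValue_alt lis
instance (lis : List Int) (out : Int × Int) : Decidable (Spec_sumAndValue lis out) := by unfold Spec_sumAndValue; infer_instance

-- ===== CLAIM (what is proved, stated in full; the proofs are below) =====
def Claim_equal_sumAndValue : Prop := ∀ (lis : List Int), Dom_sumAndValue lis → Spec_sumAndValue lis (sumAndValue lis)

-- ===== LEMMAS AND PROOFS =====
-- among multiples of 5, divisibility by 35 is the same as divisibility by 7
theorem mod35_iff_mod7 (i : Int) (h5 : PySem.Int.mod i 5 = 0) :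
    PySem.Int.mod i 35 = 0 ↔ PySem.Int.mod i 7 = 0 := by
  simp only [PySem.Int.mod_eq_zero_iff_dvd] at h5 ⊢
  constructor
  · intro h; exact dvd_trans (show (7:Int) ∣ 35 by norm_num) h
  · intro h7
    have : (5 * 7 : Int) ∣ i :=
      (Int.isCoprime_iff_gcd_eq_one.mpr (by norm_num)).mul_dvd h5 h7
    simpa using this

theorem foldl_incl_excl (lis : List Int) (s c : Int) :
    lis.foldl (fun (st : Int × Int) i =>
      if PySem.Int.mod i 5 = 0 ∧ PySem.Int.mod i 7 ≠ 0 then (st.1 + i, st.2 + 1) else st) (s, c)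
    = (s + ((lis.filter (fun i => decide (PySem.Int.mod i 5 = 0))).sum
            - ((lis.filter (fun i => decide (PySem.Int.mod i 5 = 0))).filter
                (fun i => decide (PySem.Int.mod i 35 = 0))).sum),
       c + (((lis.filter (fun i => decide (PySem.Int.mod i 5 = 0))).length : Int)
            - (((lis.filter (fun i => decide (PySem.Int.mod i 5 = 0))).filter
                (fun i => decide (PySem.Int.mod i 35 = 0))).length : Int))) := by
  induction lis generalizing s c with
  | nil => simp
  | cons x xs ih =>
    simp only [List.foldl_cons, List.filter_cons]
    by_cases h5 : PySem.Int.mod x 5 = 0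
    · by_cases h7 : PySem.Int.mod x 7 = 0
      · rw [if_neg (fun h => h.2 h7), ih]
        have h35 : PySem.Int.mod x 35 = 0 := (mod35_iff_mod7 x h5).mpr h7
        simp only [h5, h35, decide_true, if_pos, List.filter_cons, List.sum_cons,
          List.length_cons, Prod.mk.injEq]
        constructor <;> push_cast <;> ring
      · rw [if_pos ⟨h5, h7⟩, ih]
        have h35 : ¬ PySem.Int.mod x 35 = 0 := fun h => h7 ((mod35_iff_mod7 x h5).mp h)
        simp only [h5, h35, decide_true, decide_false, if_pos, List.filter_cons, List.sum_cons,
          List.length_cons, Prod.mk.injEq]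
        constructor <;> push_cast <;> ring
    · rw [if_neg (fun h => h5 h.1), ih]
      simp only [h5, decide_false, if_neg, Bool.false_eq_true, not_false_iff]

-- ===== VERDICT (by name: the statement is the Claim_ definition above) =====
theorem sumAndValue_spec : Claim_equal_sumAndValue := by
  intro lis _
  simp only [Spec_sumAndValue, sumAndValue, sumAndValue_alt, foldl_incl_excl, zero_add]
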